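-- pv_equiv track=rewrite | github.com/sphinx-doc/sphinx | sphinx/ext/l10nfigures.py | replace_spans
-- ===== SOURCE A (Python) =====
-- def replace_spans(text, spans):
--     """ This yield a series of strings """
--     if len(spans) == 0:
--         yield text
--         return
--     offset0 = spans[0][0][0]
--
--     yield text[:offset0]
--     for i, (span, content) in enumerate(spans):
--         yield content
--         if i != len(spans) - 1:
--             # For all except the last one
--             next_offset = spans[i + 1][0][0]
--             yield text[span[1]:next_offset]
--
--     last_offset = spans[-1][0][1]
--     yield text[last_offset:]
-- ===== SOURCE B (Python) =====
-- def replace_spans(text, spans):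
--     """ This yield a series of strings """
--     cursor = 0
--     for (start, end), content in spans:
--         yield text[cursor:start]
--         yield content
--         cursor = end
--     yield text[cursor:]
-- ===== Notes on version B (the rewrite author's own statement) =====
-- stated objective: simpler
-- what changed: Replaced the lookahead formulation (special empty case, enumerate index, i != len-1 branch peeking at spans[i+1], separate first/last slices) by a single running-cursor loop that yields text[cursor:start], content, and finally text[cursor:].
import Mathlib
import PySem

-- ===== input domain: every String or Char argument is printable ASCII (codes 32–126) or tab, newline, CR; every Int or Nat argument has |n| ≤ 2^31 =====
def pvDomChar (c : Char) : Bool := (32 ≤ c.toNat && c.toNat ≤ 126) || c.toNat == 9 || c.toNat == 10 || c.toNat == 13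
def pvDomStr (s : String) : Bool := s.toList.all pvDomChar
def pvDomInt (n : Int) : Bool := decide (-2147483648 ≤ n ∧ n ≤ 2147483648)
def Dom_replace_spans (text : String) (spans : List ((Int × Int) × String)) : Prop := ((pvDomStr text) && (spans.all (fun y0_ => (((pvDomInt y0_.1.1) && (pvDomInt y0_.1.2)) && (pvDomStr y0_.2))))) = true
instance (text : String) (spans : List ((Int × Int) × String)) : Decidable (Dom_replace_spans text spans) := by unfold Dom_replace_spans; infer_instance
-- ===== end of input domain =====

-- B replaces A's lookahead formulation (empty-spans special case, enumerate index,
-- i != len-1 branch peeking at spans[i+1], separate first/last slices) by one running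
-- cursor; same sequence of yielded strings (objective: simpler).

-- ===== PORT A =====
-- A's for-loop over enumerate(spans): at index i it yields content and, unless i is the
-- last index, text[span[1] : spans[i+1][0][0]] — the lookahead at spans[i+1] becomes the
-- head of the tail in this structural recursion over the same list.
def repLoopA (text : String) : List ((Int × Int) × String) → List String
  | [] => []
  | [(_, content)] => [content]
  | (span, content) :: next :: rest =>
      content :: PySem.Str.slice text (some span.2) (some next.1.1) :: repLoopA text (next :: rest)

def replace_spans (text : String) (spans : List ((Int × Int) × String)) : List String :=
  match spans with
  | [] => [text]
  | s0 :: rest =>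
      PySem.Str.slice text none (some s0.1.1)
        :: (repLoopA text (s0 :: rest)
            ++ [PySem.Str.slice text (some (((s0 :: rest).getLast (by simp)).1.2)) none])

-- ===== PORT B =====
def replace_spans_alt (text : String) (spans : List ((Int × Int) × String)) : List String :=
  let st := spans.foldl
    (fun (st : Int × List String) sp =>
      (sp.1.2, st.2 ++ [PySem.Str.slice text (some st.1) (some sp.1.1), sp.2]))
    ((0 : Int), ([] : List String))
  st.2 ++ [PySem.Str.slice text (some st.1) none]

-- ===== PRECONDITION & SPEC =====
def Spec_replace_spans (text : String) (spans : List ((Int × Int) × String)) (out : List String) : Prop := out = replace_spans_alt text spans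
instance (text : String) (spans : List ((Int × Int) × String)) (out : List String) : Decidable (Spec_replace_spans text spans out) := by unfold Spec_replace_spans; infer_instance

-- ===== CLAIM (what is proved, stated in full; the proofs are below) =====
def Claim_equal_replace_spans : Prop := ∀ (text : String) (spans : List ((Int × Int) × String)), Dom_replace_spans text spans → Spec_replace_spans text spans (replace_spans text spans)

-- ===== LEMMAS AND PROOFS =====

-- the tail of B's output produced from cursor c onwards
def tailB (text : String) (c : Int) : List ((Int × Int) × String) → List String
  | [] => [PySem.Str.slice text (some c) none]
  | sp :: rest => PySem.Str.slice text (some c) (some sp.1.1) :: sp.2 :: tailB text sp.1.2 rest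

theorem strSlice_zero_start (text : String) (b? : Option Int) :
    PySem.Str.slice text (some 0) b? = PySem.Str.slice text none b? := by
  simp [PySem.Str.slice]

theorem foldB_eq_tailB (text : String) (spans : List ((Int × Int) × String)) :
    ∀ (c : Int) (acc : List String),
      (let st := spans.foldl
        (fun (st : Int × List String) sp =>
          (sp.1.2, st.2 ++ [PySem.Str.slice text (some st.1) (some sp.1.1), sp.2]))
        (c, acc)
       st.2 ++ [PySem.Str.slice text (some st.1) none]) = acc ++ tailB text c spans := by
  induction spans with
  | nil => intro c acc; simp [tailB]
  | cons sp rest ih =>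
      intro c acc
      simp only [List.foldl_cons]
      rw [ih sp.1.2 (acc ++ [PySem.Str.slice text (some c) (some sp.1.1), sp.2])]
      simp [tailB]

theorem tailB_eq_A (text : String) :
    ∀ (rest : List ((Int × Int) × String)) (s0 : (Int × Int) × String) (c : Int),
      tailB text c (s0 :: rest)
        = PySem.Str.slice text (some c) (some s0.1.1)
          :: (repLoopA text (s0 :: rest)
              ++ [PySem.Str.slice text (some (((s0 :: rest).getLast (by simp)).1.2)) none]) := by
  intro rest
  induction rest with
  | nil => intro s0 c; simp [tailB, repLoopA]
  | cons s1 rest ih =>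
      intro s0 c
      rw [tailB, ih s1 s0.1.2]
      simp [repLoopA, List.getLast_cons]

-- ===== VERDICT (by name: the statement is the Claim_ definition above) =====
theorem replace_spans_spec : Claim_equal_replace_spans := by
  intro text spans _
  unfold Spec_replace_spans replace_spans replace_spans_alt
  cases spans with
  | nil =>
      simp [PySem.Str.slice, PySem.List.slice_none_none]
  | cons s0 rest =>
      rw [foldB_eq_tailB, tailB_eq_A]
      simp [strSlice_zero_start]
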